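-- pv_equiv track=rewrite | github.com/brendonsoto/the-elements-of-computing-systems-projects | projects/compiler/compilation_engine/XMLConverter.py | convert_param_list
-- ===== SOURCE A (Python) =====
-- DEFAULT_INDENTATION = ' ' * 2
--
-- def convert_param_list(param_list, prev_indentation_level):
--
--     # Determine the indentation
--     base_indentation = prev_indentation_level + DEFAULT_INDENTATION
--     parameter_indentation = base_indentation + DEFAULT_INDENTATION
--
--     # XML Tags
--     parameter_tags = [
--             "{0}<keyword> {1} </keyword>\n".format(parameter_indentation, param_list[0][0]),
--             "{0}<identifier> {1} </identifier>\n".format(parameter_indentation, param_list[0][1])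
--             ]
--
--     for param_tuple in param_list[1:]:
--         parameter_tags.extend([
--             "{0}<symbol> , </symbol>\n".format(parameter_indentation),
--             "{0}<keyword> {1} </keyword>\n".format(parameter_indentation, param_tuple[0]),
--             "{0}<identifier> {1} </identifier>\n".format(parameter_indentation, param_tuple[1])
--             ])
--
--     xml_tags = [
--             "{0}<parameterList>\n".format(base_indentation),
--             ''.join(parameter_tags),
--             "{0}</parameterList>\n".format(base_indentation)
--             ]
--
--     return ''.join(xml_tags)
-- ===== SOURCE B (Python) =====
-- DEFAULT_INDENTATION = ' ' * 2
--
-- def convert_param_list(param_list, prev_indentation_level):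
--     base = prev_indentation_level + DEFAULT_INDENTATION
--     indent = base + DEFAULT_INDENTATION
--     groups = [
--         "{0}<keyword> {1} </keyword>\n{0}<identifier> {2} </identifier>\n".format(indent, t, n)
--         for (t, n) in param_list
--     ]
--     separator = "{0}<symbol> , </symbol>\n".format(indent)
--     return ("{0}<parameterList>\n".format(base)
--             + separator.join(groups)
--             + "{0}</parameterList>\n".format(base))
-- ===== Notes on version B (the rewrite author's own statement) =====
-- stated objective: simpler
-- what changed: B builds one uniform two-line fragment per parameter and joins them with the comma tag as separator, instead of A's special-cased first element plus an extend-loop over param_list[1:].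
import Mathlib
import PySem

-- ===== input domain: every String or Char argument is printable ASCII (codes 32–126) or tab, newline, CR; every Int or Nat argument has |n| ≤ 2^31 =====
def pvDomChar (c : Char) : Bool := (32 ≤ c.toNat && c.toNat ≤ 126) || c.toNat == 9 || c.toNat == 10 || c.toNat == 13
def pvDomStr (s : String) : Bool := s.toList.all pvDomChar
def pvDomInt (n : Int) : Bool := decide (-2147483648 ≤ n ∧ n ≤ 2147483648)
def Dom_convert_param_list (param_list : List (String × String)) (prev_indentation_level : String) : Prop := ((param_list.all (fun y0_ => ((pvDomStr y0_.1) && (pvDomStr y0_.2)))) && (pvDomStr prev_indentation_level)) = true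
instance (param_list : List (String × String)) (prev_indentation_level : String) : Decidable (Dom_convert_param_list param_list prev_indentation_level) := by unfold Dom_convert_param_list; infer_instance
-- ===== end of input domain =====

-- B replaces A's special-cased first parameter + extend-loop by a uniform per-parameter
-- fragment joined with the comma tag as separator (objective: simpler).

-- ===== PORT A =====
-- literal port of A; param_list[0] is pyGet? (none = IndexError, excluded by Pre_,
-- getD is a placeholder never reached inside Pre_)
def convert_param_list (param_list : List (String × String)) (prev_indentation_level : String) : String :=
  let base_indentation := prev_indentation_level ++ "  "
  let parameter_indentation := base_indentation ++ "  "
  let first := (PySem.List.pyGet? param_list 0).getD ("", "")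
  let parameter_tags : List String :=
    [parameter_indentation ++ "<keyword> " ++ first.1 ++ " </keyword>\n",
     parameter_indentation ++ "<identifier> " ++ first.2 ++ " </identifier>\n"]
  let parameter_tags :=
    (param_list.drop 1).foldl (fun acc param_tuple =>
      acc ++ [parameter_indentation ++ "<symbol> , </symbol>\n",
              parameter_indentation ++ "<keyword> " ++ param_tuple.1 ++ " </keyword>\n",
              parameter_indentation ++ "<identifier> " ++ param_tuple.2 ++ " </identifier>\n"])
      parameter_tags
  let xml_tags : List String :=
    [base_indentation ++ "<parameterList>\n",
     String.join parameter_tags,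
     base_indentation ++ "</parameterList>\n"]
  String.join xml_tags

-- ===== PORT B =====
-- hand port of Python's str.join(separator, groups) (exact: empty separator-joined groups for [])
def joinSep (sep : String) : List String → String
  | [] => ""
  | [x] => x
  | x :: xs => x ++ sep ++ joinSep sep xs

def convert_param_list_alt (param_list : List (String × String)) (prev_indentation_level : String) : String :=
  let base := prev_indentation_level ++ "  "
  let indent := base ++ "  "
  let groups := param_list.map (fun t =>
    indent ++ "<keyword> " ++ t.1 ++ " </keyword>\n" ++
    indent ++ "<identifier> " ++ t.2 ++ " </identifier>\n")
  let separator := indent ++ "<symbol> , </symbol>\n"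
  base ++ "<parameterList>\n" ++ joinSep separator groups ++ base ++ "</parameterList>\n"

-- ===== PRECONDITION & SPEC =====
-- A indexes param_list[0]: it raises IndexError on the empty list, so Pre_ excludes it.
def Pre_convert_param_list (param_list : List (String × String)) (prev_indentation_level : String) : Prop := param_list ≠ []
instance (param_list : List (String × String)) (prev_indentation_level : String) : Decidable (Pre_convert_param_list param_list prev_indentation_level) := by unfold Pre_convert_param_list; infer_instance
def pvWitness_convert_param_list : (List (String × String)) × String := ([("int", "x")], "")

def Spec_convert_param_list (param_list : List (String × String)) (prev_indentation_level : String) (out : String) : Prop := out = convert_param_list_alt param_list prev_indentation_level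
instance (param_list : List (String × String)) (prev_indentation_level : String) (out : String) : Decidable (Spec_convert_param_list param_list prev_indentation_level out) := by unfold Spec_convert_param_list; infer_instance

-- ===== CLAIM (what is proved, stated in full; the proofs are below) =====
def Claim_equal_convert_param_list : Prop := ∀ (param_list : List (String × String)) (prev_indentation_level : String), Dom_convert_param_list param_list prev_indentation_level → Pre_convert_param_list param_list prev_indentation_level → Spec_convert_param_list param_list prev_indentation_level (convert_param_list param_list prev_indentation_level)

-- ===== LEMMAS AND PROOFS =====

theorem foldl_append_acc (l : List String) (acc : String) :
    List.foldl (fun r s => r ++ s) acc l = acc ++ List.foldl (fun r s => r ++ s) "" l := by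
  induction l generalizing acc with
  | nil => simp
  | cons h tl ih => rw [List.foldl_cons, ih, List.foldl_cons, ih ("" ++ h)]; simp [String.append_assoc]

theorem join_cons (x : String) (l : List String) :
    String.join (x :: l) = x ++ String.join l := by
  simp only [String.join, List.foldl_cons]
  rw [foldl_append_acc]
  simp

theorem join_append (a b : List String) :
    String.join (a ++ b) = String.join a ++ String.join b := by
  induction a with
  | nil => simp [String.join]
  | cons h tl ih => simp only [List.cons_append, join_cons, ih, String.append_assoc]

theorem join_triple (a b c : String) : String.join [a, b, c] = a ++ (b ++ c) := by
  simp [String.join, String.append_assoc]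

-- A's loop, with the join applied: joining the foldl-extended tag list equals
-- joining the initial tags then appending the three tags of each remaining tuple.
theorem join_foldl_extend (ind : String) (l : List (String × String)) (init : List String) :
    String.join (l.foldl (fun acc t =>
      acc ++ [ind ++ "<symbol> , </symbol>\n",
              ind ++ "<keyword> " ++ t.1 ++ " </keyword>\n",
              ind ++ "<identifier> " ++ t.2 ++ " </identifier>\n"]) init)
    = String.join init ++ String.join (l.map (fun t =>
        ind ++ "<symbol> , </symbol>\n" ++
        (ind ++ "<keyword> " ++ t.1 ++ " </keyword>\n" ++
         (ind ++ "<identifier> " ++ t.2 ++ " </identifier>\n")))) := by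
  induction l generalizing init with
  | nil => simp [String.join]
  | cons h tl ih =>
    rw [List.foldl_cons, ih, join_append, join_triple, List.map_cons, join_cons]
    simp [String.append_assoc]

-- B's separator-join over a cons equals head group then sep-prefixed tail groups.
theorem joinSep_cons_map (sep : String) (g : (String × String) → String)
    (h : String × String) (tl : List (String × String)) :
    joinSep sep ((h :: tl).map g)
    = g h ++ String.join (tl.map (fun t => sep ++ g t)) := by
  induction tl generalizing h with
  | nil => simp [joinSep, String.join]
  | cons h2 tl2 ih =>
    simp only [List.map_cons] at *
    rw [show joinSep sep (g h :: g h2 :: List.map g tl2)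
          = g h ++ sep ++ joinSep sep (g h2 :: List.map g tl2) from rfl, ih]
    rw [join_cons]
    simp [String.append_assoc]

theorem convert_param_list_eq (param_list : List (String × String)) (prev : String)
    (hne : param_list ≠ []) :
    convert_param_list param_list prev = convert_param_list_alt param_list prev := by
  obtain ⟨h, tl, rfl⟩ := List.exists_cons_of_ne_nil hne
  unfold convert_param_list convert_param_list_alt
  simp only [PySem.List.pyGet?, PySem.List.pyIdx?, List.drop_one, List.tail_cons]
  rw [join_foldl_extend, joinSep_cons_map]
  simp [String.join, String.append_assoc]

-- ===== VERDICT (by name: the statement is the Claim_ definition above) =====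
theorem convert_param_list_spec : Claim_equal_convert_param_list := by
  intro pl prev _ hpre
  exact convert_param_list_eq pl prev hpre
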